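-- pv_equiv track=rewrite | github.com/KayelC/JRPG | Documentation/evolve_database.py | reorder_demon_affinities
-- ===== SOURCE A (Python) =====
-- from collections import OrderedDict
--
-- def reorder_demon_affinities(demon):
--     """
--     Creates a new affinity dictionary with 'Earth' inserted
--     specifically after 'Wind' and before 'Light'.
--     """
--     if "Affinities" not in demon:
--         return demon
--
--     old_affs = demon["Affinities"]
--     new_affs = OrderedDict()
--
--     # Define the default value for the new column
--     default_earth_val = "Normal"
--
--     # We iterate through the existing keys and rebuild the dictionary
--     # to enforce the specific column order.
--     for key, value in old_affs.items():
--         # Add the current key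
--         new_affs[key] = value
--
--         # Logic: If we just added 'Wind', immediately insert 'Earth'
--         if key == "Wind":
--             # If Earth already exists (from a previous run), we skip
--             # to avoid duplicates, otherwise we inject the new column.
--             if "Earth" not in old_affs:
--                 new_affs["Earth"] = default_earth_val
--
--     # Safety check: if 'Wind' was missing for some reason,
--     # ensure Earth is still added before Light or at least exists.
--     if "Earth" not in new_affs:
--         # Re-verify if we need to insert it before Light if Wind was missing
--         final_affs = OrderedDict()
--         inserted = False
--         for k, v in new_affs.items():
--             if k == "Light" and not inserted:
--                 final_affs["Earth"] = default_earth_val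
--                 inserted = True
--             final_affs[k] = v
--
--         # If still not found (no Wind and no Light), append to end
--         if "Earth" not in final_affs:
--             final_affs["Earth"] = default_earth_val
--
--         demon["Affinities"] = final_affs
--     else:
--         demon["Affinities"] = new_affs
--
--     return demon
-- ===== SOURCE B (Python) =====
-- from collections import OrderedDict
--
-- def reorder_demon_affinities(demon):
--     if "Affinities" not in demon:
--         return demon
--     items = list(demon["Affinities"].items())
--     keys = [k for k, _ in items]
--     if "Earth" not in keys:
--         if "Wind" in keys:
--             pos = keys.index("Wind") + 1
--         elif "Light" in keys:
--             pos = keys.index("Light")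
--         else:
--             pos = len(items)
--         items.insert(pos, ("Earth", "Normal"))
--     demon["Affinities"] = OrderedDict(items)
--     return demon
-- ===== Notes on version B (the rewrite author's own statement) =====
-- stated objective: simpler
-- what changed: A's two streaming dict-rebuild passes (copy-with-conditional-injection after Wind, then a second flagged pass before Light, then an append fallback) are replaced by computing a single insertion index (after Wind, else at Light, else end) and splicing ('Earth','Normal') into the item list once.
import Mathlib
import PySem

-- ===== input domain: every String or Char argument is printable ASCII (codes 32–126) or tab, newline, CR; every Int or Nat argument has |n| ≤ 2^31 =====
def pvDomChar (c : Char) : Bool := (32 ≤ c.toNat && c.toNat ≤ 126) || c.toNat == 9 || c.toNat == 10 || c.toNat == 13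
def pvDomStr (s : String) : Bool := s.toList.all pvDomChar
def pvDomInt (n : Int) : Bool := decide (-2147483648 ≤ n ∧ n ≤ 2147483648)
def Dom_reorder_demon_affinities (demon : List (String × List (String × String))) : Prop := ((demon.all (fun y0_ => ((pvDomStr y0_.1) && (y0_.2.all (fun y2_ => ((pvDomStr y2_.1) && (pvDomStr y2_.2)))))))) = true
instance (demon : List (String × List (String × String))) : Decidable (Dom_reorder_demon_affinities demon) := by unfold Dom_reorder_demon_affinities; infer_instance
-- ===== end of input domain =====

-- B replaces A's two streaming dict-rebuild passes by computing one insertion index and splicing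
-- ('Earth','Normal') into the item list (objective: simpler). Python A mutates demon in place; the
-- equivalence proved here is about the RETURN value (B performs the same in-place key update).

-- ===== PORT A =====
def pvStepA (old_affs : PySem.Dict String String) (na : PySem.Dict String String)
    (kv : String × String) : PySem.Dict String String :=
  let na := na.insert kv.1 kv.2
  if kv.1 == "Wind" then
    if old_affs.contains "Earth" then na else na.insert "Earth" "Normal"
  else na
def pvStepA2 (p : PySem.Dict String String × Bool) (kv : String × String) :
    PySem.Dict String String × Bool :=
  let p := if kv.1 == "Light" && !p.2 then (p.1.insert "Earth" "Normal", true) else p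
  (p.1.insert kv.1 kv.2, p.2)

def reorder_demon_affinities (demon : List (String × List (String × String))) :
    List (String × List (String × String)) :=
  let d : PySem.Dict String (List (String × String)) := PySem.Dict.mk demon
  if d.contains "Affinities" = false then demon
  else
    let old_affs : PySem.Dict String String := PySem.Dict.mk (d.getD "Affinities" [])
    let new_affs := old_affs.items.foldl (pvStepA old_affs) PySem.Dict.empty
    if new_affs.contains "Earth" = false then
      let fi := new_affs.items.foldl pvStepA2 (PySem.Dict.empty, false)
      let final := if fi.1.contains "Earth" = false then fi.1.insert "Earth" "Normal" else fi.1
      (d.insert "Affinities" final.items).items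
    else
      (d.insert "Affinities" new_affs.items).items

-- ===== PORT B =====
def reorder_demon_affinities_alt (demon : List (String × List (String × String))) :
    List (String × List (String × String)) :=
  let d : PySem.Dict String (List (String × String)) := PySem.Dict.mk demon
  if d.contains "Affinities" = false then demon
  else
    let items := d.getD "Affinities" []
    let keys := items.map Prod.fst
    let items2 :=
      if keys.contains "Earth" then items
      else
        let pos : Int :=
          if keys.contains "Wind" then ((PySem.List.index? keys "Wind").getD 0 : Int) + 1
          else if keys.contains "Light" then ((PySem.List.index? keys "Light").getD 0 : Int)
          else (items.length : Int)
        PySem.List.insert items pos ("Earth", "Normal")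
    (d.insert "Affinities" (PySem.Dict.ofList items2).items).items

-- ===== PRECONDITION & SPEC =====
-- Pre_ excludes only association lists whose 'Affinities' value carries a duplicate key: no Python
-- dict can represent such a value, so A never receives one.
def Pre_reorder_demon_affinities (demon : List (String × List (String × String))) : Prop :=
  (((PySem.Dict.mk demon).getD "Affinities" []).map Prod.fst).Nodup
instance (demon : List (String × List (String × String))) : Decidable (Pre_reorder_demon_affinities demon) := by unfold Pre_reorder_demon_affinities; infer_instance

def pvWitness_reorder_demon_affinities : (List (String × List (String × String))) :=
  [("Affinities", [("Fire", "Weak"), ("Wind", "Resist"), ("Light", "Null")])]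

def Spec_reorder_demon_affinities (demon : List (String × List (String × String))) (out : List (String × List (String × String))) : Prop := out = reorder_demon_affinities_alt demon
instance (demon : List (String × List (String × String))) (out : List (String × List (String × String))) : Decidable (Spec_reorder_demon_affinities demon out) := by unfold Spec_reorder_demon_affinities; infer_instance

-- ===== CLAIM (what is proved, stated in full; the proofs are below) =====
def Claim_equal_reorder_demon_affinities : Prop := ∀ (demon : List (String × List (String × String))), Dom_reorder_demon_affinities demon → Pre_reorder_demon_affinities demon → Spec_reorder_demon_affinities demon (reorder_demon_affinities demon)

-- ===== LEMMAS AND PROOFS =====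
theorem pv_copy_items (l : List (String × String)) (h : (l.map Prod.fst).Nodup) :
    (l.foldl (fun acc p => acc.insert p.1 p.2) (PySem.Dict.empty : PySem.Dict String String)).items = l := by
  rw [PySem.Dict.items_foldl_insert_fresh l Prod.fst Prod.snd _ (by simp) h]
  simp [PySem.Dict.empty]

theorem pv_items_ofList {ps : List (String × String)} (h : (ps.map Prod.fst).Nodup) :
    (PySem.Dict.ofList ps).items = ps := by
  simpa [PySem.Dict.ofList, PySem.Dict.update] using pv_copy_items ps h

theorem pv_stepA_copy (old_affs : PySem.Dict String String) (l : List (String × String))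
    (h : old_affs.contains "Earth" = true ∨ "Wind" ∉ l.map Prod.fst)
    (d : PySem.Dict String String) :
    l.foldl (pvStepA old_affs) d = l.foldl (fun acc p => acc.insert p.1 p.2) d := by
  apply PySem.List.foldl_congr_mem'
  intro x hx acc
  rcases h with h | h
  · simp [pvStepA, h]
  · have : x.1 ≠ "Wind" := by
      intro hw; exact h (by simpa [hw] using List.mem_map_of_mem (f := Prod.fst) hx)
    simp [pvStepA, this]

theorem pv_stepA2_true (l : List (String × String)) (d : PySem.Dict String String) :
    l.foldl pvStepA2 (d, true) = (l.foldl (fun acc p => acc.insert p.1 p.2) d, true) := by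
  induction l generalizing d with
  | nil => rfl
  | cons x t ih => simp [pvStepA2, ih]

theorem pv_stepA2_false (l : List (String × String)) (h : "Light" ∉ l.map Prod.fst)
    (d : PySem.Dict String String) :
    l.foldl pvStepA2 (d, false) = (l.foldl (fun acc p => acc.insert p.1 p.2) d, false) := by
  induction l generalizing d with
  | nil => rfl
  | cons x t ih =>
    simp only [List.map_cons, List.mem_cons, not_or] at h
    simp [pvStepA2, Ne.symm h.1, ih h.2]

theorem pv_contains_false {ν : Type} {d : PySem.Dict String ν} {l : List (String × ν)}
    (hd : d.items = l) {k : String} (hk : k ∉ l.map Prod.fst) : d.contains k = false := by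
  simp only [PySem.Dict.contains, hd, List.any_eq_false]
  intro p hp h
  exact hk ((eq_of_beq h) ▸ List.mem_map_of_mem hp)

theorem pv_contains_true {ν : Type} {d : PySem.Dict String ν} {l : List (String × ν)}
    (hd : d.items = l) {k : String} (hk : k ∈ l.map Prod.fst) : d.contains k = true := by
  simp only [PySem.Dict.contains, hd, List.any_eq_true]
  obtain ⟨p, hp, hf⟩ := List.mem_map.1 hk
  exact ⟨p, hp, by simp [hf]⟩

-- A copy fold over a list with nodup keys, starting from a dict disjoint from those keys, appends.
theorem pv_copy_items_from (l : List (String × String)) (d : PySem.Dict String String)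
    (hfresh : ∀ a ∈ l, d.contains a.1 = false) (h : (l.map Prod.fst).Nodup) :
    (l.foldl (fun acc p => acc.insert p.1 p.2) d).items = d.items ++ l := by
  rw [PySem.Dict.items_foldl_insert_fresh l Prod.fst Prod.snd _ hfresh h]
  simp

-- the heart: on a nodup-keyed affinity list A's two-pass rebuild = B's index-splice + OrderedDict
theorem pv_core (o : List (String × String)) (hnd : (o.map Prod.fst).Nodup) :
    (let old_affs : PySem.Dict String String := PySem.Dict.mk o
     let new_affs := old_affs.items.foldl (pvStepA old_affs) PySem.Dict.empty
     if new_affs.contains "Earth" = false then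
       let fi := new_affs.items.foldl pvStepA2 (PySem.Dict.empty, false)
       if fi.1.contains "Earth" = false then (fi.1.insert "Earth" "Normal").items else fi.1.items
     else new_affs.items)
    =
    (let keys := o.map Prod.fst
     let items2 :=
       if keys.contains "Earth" then o
       else
         let pos : Int :=
           if keys.contains "Wind" then ((PySem.List.index? keys "Wind").getD 0 : Int) + 1
           else if keys.contains "Light" then ((PySem.List.index? keys "Light").getD 0 : Int)
           else (o.length : Int)
         PySem.List.insert o pos ("Earth", "Normal")
     (PySem.Dict.ofList items2).items) := by
  simp only
  by_cases hE : "Earth" ∈ o.map Prod.fst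
  · -- Earth already present: both sides copy o
    have hkE : (o.map Prod.fst).contains "Earth" = true := by simpa using hE
    rw [pv_stepA_copy _ o (Or.inl (pv_contains_true rfl hE))]
    rw [if_neg (by simp [pv_contains_true (pv_copy_items o hnd) hE])]
    rw [if_pos hkE, pv_copy_items o hnd, pv_items_ofList hnd]
  · have hkE : (o.map Prod.fst).contains "Earth" = false := by simpa using hE
    have hold : (PySem.Dict.mk o).contains "Earth" = false := pv_contains_false rfl hE
    by_cases hW : "Wind" ∈ o.map Prod.fst
    · -- Wind present, Earth absent: splice right after the first Wind
      have hkW : (o.map Prod.fst).contains "Wind" = true := by simpa using hW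
      obtain ⟨p, hp, hpf⟩ := List.mem_map.1 hW
      obtain ⟨l1, l2, rfl⟩ := List.append_of_mem hp
      obtain ⟨k, w⟩ := p
      simp only at hpf; subst hpf
      have hnd' := hnd; rw [List.map_append, List.map_cons] at hnd'
      have h1 : (l1.map Prod.fst).Nodup := (List.nodup_append.1 hnd').1
      have h2' := (List.nodup_append.1 hnd').2.1
      have hdisj := (List.nodup_append.1 hnd').2.2
      have hWl2 : "Wind" ∉ l2.map Prod.fst := (List.nodup_cons.1 h2').1
      have h2 : (l2.map Prod.fst).Nodup := (List.nodup_cons.1 h2').2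
      have hWl1 : "Wind" ∉ l1.map Prod.fst := fun h => hdisj _ h _ List.mem_cons_self rfl
      have hE' := hE; rw [List.map_append, List.map_cons] at hE'
      simp only [List.mem_append, List.mem_cons, not_or] at hE'
      have hEl1 : "Earth" ∉ l1.map Prod.fst := hE'.1
      have hEl2 : "Earth" ∉ l2.map Prod.fst := hE'.2.2
      -- A side
      rw [List.foldl_append, List.foldl_cons, pv_stepA_copy _ l1 (Or.inr hWl1)]
      have e1 : ((l1.foldl (fun acc p => acc.insert p.1 p.2) PySem.Dict.empty)).items = l1 :=
        pv_copy_items l1 h1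
      have estep : pvStepA (PySem.Dict.mk (l1 ++ ("Wind", w) :: l2))
          (l1.foldl (fun acc p => acc.insert p.1 p.2) PySem.Dict.empty) ("Wind", w)
          = ((l1.foldl (fun acc p => acc.insert p.1 p.2) PySem.Dict.empty).insert "Wind" w).insert "Earth" "Normal" := by
        simp [pvStepA, hold]
      rw [estep, pv_stepA_copy _ l2 (Or.inr hWl2)]
      have c1 : (l1.foldl (fun acc p => acc.insert p.1 p.2) PySem.Dict.empty).contains "Wind" = false :=
        pv_contains_false e1 hWl1
      have e2a : ((l1.foldl (fun acc p => acc.insert p.1 p.2) PySem.Dict.empty).insert "Wind" w).items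
          = l1 ++ [("Wind", w)] := by
        rw [PySem.Dict.items_insert_of_not_contains _ _ c1, e1]
      have c2 : ((l1.foldl (fun acc p => acc.insert p.1 p.2) PySem.Dict.empty).insert "Wind" w).contains "Earth" = false := by
        apply pv_contains_false e2a
        rw [List.map_append]
        simp [hEl1]
      have e2 : (((l1.foldl (fun acc p => acc.insert p.1 p.2) PySem.Dict.empty).insert "Wind" w).insert "Earth" "Normal").items
          = (l1 ++ [("Wind", w)]) ++ [("Earth", "Normal")] := by
        rw [PySem.Dict.items_insert_of_not_contains _ _ c2, e2a]
      have hfresh : ∀ a ∈ l2,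
          (((l1.foldl (fun acc p => acc.insert p.1 p.2) PySem.Dict.empty).insert "Wind" w).insert "Earth" "Normal").contains a.1 = false := by
        intro a ha
        apply pv_contains_false e2
        have haf : a.1 ∈ l2.map Prod.fst := List.mem_map_of_mem ha
        have d1' : a.1 ∉ l1.map Prod.fst := fun h => hdisj _ h _ (List.mem_cons_of_mem _ haf) rfl
        have d2' : a.1 ≠ "Wind" := fun h => hWl2 (h ▸ haf)
        have d3' : a.1 ≠ "Earth" := fun h => hEl2 (h ▸ haf)
        simp [List.map_append, d1', d2', d3']
      have e3 : ((l2.foldl (fun acc p => acc.insert p.1 p.2)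
          (((l1.foldl (fun acc p => acc.insert p.1 p.2) PySem.Dict.empty).insert "Wind" w).insert "Earth" "Normal"))).items
          = ((l1 ++ [("Wind", w)]) ++ [("Earth", "Normal")]) ++ l2 := by
        rw [pv_copy_items_from l2 _ hfresh h2, e2]
      have mE : "Earth" ∈ (((l1 ++ [("Wind", w)]) ++ [("Earth", "Normal")]) ++ l2).map Prod.fst := by simp
      rw [if_neg (by simp [pv_contains_true e3 mE])]
      rw [e3]
      rw [if_neg (by rw [hkE]; exact Bool.false_ne_true), if_pos hkW]
      -- B side
      have hidx : PySem.List.index? ((l1 ++ ("Wind", w) :: l2).map Prod.fst) "Wind"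
          = some (l1.map Prod.fst).length := by
        rw [PySem.List.index?_eq_some_iff]
        exact ⟨l1.map Prod.fst, l2.map Prod.fst, by rw [List.map_append, List.map_cons], rfl, hWl1⟩
      rw [hidx]
      have hcast : ((((some (l1.map Prod.fst).length).getD 0 : Nat) : Int) + 1)
          = (((l1.length + 1 : Nat)) : Int) := by simp
      rw [hcast, PySem.List.insert_natCast _ (l1.length + 1) _ (by simp)]
      have htake : (l1 ++ ("Wind", w) :: l2).take (l1.length + 1) = l1 ++ [("Wind", w)] := by
        simpa using List.take_length_add_append (l₁ := l1) (l₂ := ("Wind", w) :: l2) 1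
      have hdrop : (l1 ++ ("Wind", w) :: l2).drop (l1.length + 1) = l2 := by
        simp
      rw [htake, hdrop]
      have nA : (l1.map Prod.fst ++ ["Wind"]).Nodup := by
        refine List.Nodup.append h1 (by simp) ?_
        intro a ha hb
        simp only [List.mem_singleton] at hb
        exact hWl1 (hb ▸ ha)
      have nB : ("Earth" :: l2.map Prod.fst).Nodup := List.nodup_cons.2 ⟨hEl2, h2⟩
      have disj : (l1.map Prod.fst ++ ["Wind"]).Disjoint ("Earth" :: l2.map Prod.fst) := by
        intro a ha hb
        rcases List.mem_append.1 ha with ha1 | ha1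
        · rcases List.mem_cons.1 hb with rfl | hb1
          · exact hEl1 ha1
          · exact hdisj _ ha1 _ (List.mem_cons_of_mem _ hb1) rfl
        · simp only [List.mem_singleton] at ha1
          subst ha1
          rcases List.mem_cons.1 hb with h | h
          · exact absurd h (by decide)
          · exact hWl2 h
      have hndL : (((l1 ++ [("Wind", w)]) ++ ("Earth", "Normal") :: l2).map Prod.fst).Nodup := by
        rw [List.map_append, List.map_append, List.map_cons, List.map_cons, List.map_nil]
        exact List.Nodup.append nA nB disj
      rw [pv_items_ofList hndL]
      simp
    · -- no Wind, no Earth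
      have hkW : (o.map Prod.fst).contains "Wind" = false := by simpa using hW
      rw [pv_stepA_copy _ o (Or.inr hW)]
      rw [if_pos (pv_contains_false (pv_copy_items o hnd) hE), pv_copy_items o hnd]
      by_cases hL : "Light" ∈ o.map Prod.fst
      · -- Light present: splice before the first Light
        have hkL : (o.map Prod.fst).contains "Light" = true := by simpa using hL
        obtain ⟨p, hp, hpf⟩ := List.mem_map.1 hL
        obtain ⟨m1, m2, rfl⟩ := List.append_of_mem hp
        obtain ⟨k, x⟩ := p
        simp only at hpf; subst hpf
        have hnd' := hnd; rw [List.map_append, List.map_cons] at hnd'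
        have h1 : (m1.map Prod.fst).Nodup := (List.nodup_append.1 hnd').1
        have h2' := (List.nodup_append.1 hnd').2.1
        have hdisj := (List.nodup_append.1 hnd').2.2
        have hLm2 : "Light" ∉ m2.map Prod.fst := (List.nodup_cons.1 h2').1
        have h2 : (m2.map Prod.fst).Nodup := (List.nodup_cons.1 h2').2
        have hLm1 : "Light" ∉ m1.map Prod.fst := fun h => hdisj _ h _ List.mem_cons_self rfl
        have hE' := hE; rw [List.map_append, List.map_cons] at hE'
        simp only [List.mem_append, List.mem_cons, not_or] at hE'
        have hEm1 : "Earth" ∉ m1.map Prod.fst := hE'.1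
        have hEm2 : "Earth" ∉ m2.map Prod.fst := hE'.2.2
        -- A's second pass
        rw [List.foldl_append, List.foldl_cons, pv_stepA2_false m1 hLm1]
        have e1 : ((m1.foldl (fun acc p => acc.insert p.1 p.2) PySem.Dict.empty)).items = m1 :=
          pv_copy_items m1 h1
        have estep : pvStepA2 ((m1.foldl (fun acc p => acc.insert p.1 p.2) PySem.Dict.empty), false) ("Light", x)
            = (((m1.foldl (fun acc p => acc.insert p.1 p.2) PySem.Dict.empty).insert "Earth" "Normal").insert "Light" x, true) := by
          simp [pvStepA2]
        rw [estep, pv_stepA2_true m2]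
        have c1 : (m1.foldl (fun acc p => acc.insert p.1 p.2) PySem.Dict.empty).contains "Earth" = false :=
          pv_contains_false e1 hEm1
        have e2a : ((m1.foldl (fun acc p => acc.insert p.1 p.2) PySem.Dict.empty).insert "Earth" "Normal").items
            = m1 ++ [("Earth", "Normal")] := by
          rw [PySem.Dict.items_insert_of_not_contains _ _ c1, e1]
        have c2 : ((m1.foldl (fun acc p => acc.insert p.1 p.2) PySem.Dict.empty).insert "Earth" "Normal").contains "Light" = false := by
          apply pv_contains_false e2a
          rw [List.map_append]
          simp [hLm1]
        have e2 : (((m1.foldl (fun acc p => acc.insert p.1 p.2) PySem.Dict.empty).insert "Earth" "Normal").insert "Light" x).items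
            = (m1 ++ [("Earth", "Normal")]) ++ [("Light", x)] := by
          rw [PySem.Dict.items_insert_of_not_contains _ _ c2, e2a]
        have hfresh : ∀ a ∈ m2,
            (((m1.foldl (fun acc p => acc.insert p.1 p.2) PySem.Dict.empty).insert "Earth" "Normal").insert "Light" x).contains a.1 = false := by
          intro a ha
          apply pv_contains_false e2
          have haf : a.1 ∈ m2.map Prod.fst := List.mem_map_of_mem ha
          have d1' : a.1 ∉ m1.map Prod.fst := fun h => hdisj _ h _ (List.mem_cons_of_mem _ haf) rfl
          have d2' : a.1 ≠ "Light" := fun h => hLm2 (h ▸ haf)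
          have d3' : a.1 ≠ "Earth" := fun h => hEm2 (h ▸ haf)
          simp [List.map_append, d1', d2', d3']
        have e3 : ((m2.foldl (fun acc p => acc.insert p.1 p.2)
            (((m1.foldl (fun acc p => acc.insert p.1 p.2) PySem.Dict.empty).insert "Earth" "Normal").insert "Light" x))).items
            = ((m1 ++ [("Earth", "Normal")]) ++ [("Light", x)]) ++ m2 := by
          rw [pv_copy_items_from m2 _ hfresh h2, e2]
        have mE : "Earth" ∈ (((m1 ++ [("Earth", "Normal")]) ++ [("Light", x)]) ++ m2).map Prod.fst := by simp
        rw [if_neg (by simp [pv_contains_true e3 mE])]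
        dsimp only
        rw [e3]
        rw [if_neg (by rw [hkE]; exact Bool.false_ne_true), if_neg (by rw [hkW]; exact Bool.false_ne_true), if_pos hkL]
        -- B side
        have hidx : PySem.List.index? ((m1 ++ ("Light", x) :: m2).map Prod.fst) "Light"
            = some (m1.map Prod.fst).length := by
          rw [PySem.List.index?_eq_some_iff]
          exact ⟨m1.map Prod.fst, m2.map Prod.fst, by rw [List.map_append, List.map_cons], rfl, hLm1⟩
        rw [hidx]
        have hcast : (((some (m1.map Prod.fst).length).getD 0 : Nat) : Int) = ((m1.length : Nat) : Int) := by simp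
        rw [hcast, PySem.List.insert_natCast _ m1.length _ (by simp)]
        have htake : (m1 ++ ("Light", x) :: m2).take m1.length = m1 := by
          simp
        have hdrop : (m1 ++ ("Light", x) :: m2).drop m1.length = ("Light", x) :: m2 := by
          simp
        rw [htake, hdrop]
        have nB : ("Earth" :: "Light" :: m2.map Prod.fst).Nodup := by
          refine List.nodup_cons.2 ⟨?_, List.nodup_cons.2 ⟨hLm2, h2⟩⟩
          simp [hEm2]
        have disj : (m1.map Prod.fst).Disjoint ("Earth" :: "Light" :: m2.map Prod.fst) := by
          intro a ha hb
          rcases List.mem_cons.1 hb with rfl | hb1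
          · exact hEm1 ha
          · rcases List.mem_cons.1 hb1 with rfl | hb2
            · exact hLm1 ha
            · exact hdisj _ ha _ (List.mem_cons_of_mem _ hb2) rfl
        have hndL : ((m1 ++ ("Earth", "Normal") :: ("Light", x) :: m2).map Prod.fst).Nodup := by
          rw [List.map_append, List.map_cons, List.map_cons]
          exact List.Nodup.append h1 nB disj
        rw [pv_items_ofList hndL]
        simp
      · -- neither Wind nor Light: append at the end
        have hkL : (o.map Prod.fst).contains "Light" = false := by simpa using hL
        rw [pv_stepA2_false o hL]
        dsimp only
        have c1 : (o.foldl (fun acc p => acc.insert p.1 p.2) PySem.Dict.empty).contains "Earth" = false :=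
          pv_contains_false (pv_copy_items o hnd) hE
        rw [if_pos c1, PySem.Dict.items_insert_of_not_contains _ _ c1, pv_copy_items o hnd]
        rw [if_neg (by rw [hkE]; exact Bool.false_ne_true), if_neg (by rw [hkW]; exact Bool.false_ne_true), if_neg (by rw [hkL]; exact Bool.false_ne_true)]
        rw [PySem.List.insert_natCast o o.length _ (le_refl _), List.take_length, List.drop_length]
        have hndL : ((o ++ [("Earth", "Normal")]).map Prod.fst).Nodup := by
          rw [List.map_append, List.map_cons, List.map_nil]
          refine List.Nodup.append hnd (by simp) ?_
          intro a ha hb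
          simp only [List.mem_singleton] at hb
          exact hE (hb ▸ ha)
        rw [pv_items_ofList hndL]

-- ===== VERDICT (by name: the statement is the Claim_ definition above) =====
theorem reorder_demon_affinities_spec : Claim_equal_reorder_demon_affinities := by
  intro demon _ hpre
  show reorder_demon_affinities demon = reorder_demon_affinities_alt demon
  unfold reorder_demon_affinities reorder_demon_affinities_alt
  simp only
  by_cases hc : (PySem.Dict.mk demon).contains "Affinities" = false
  · rw [if_pos hc, if_pos hc]
  · rw [if_neg hc, if_neg hc]
    have hcore := pv_core ((PySem.Dict.mk demon).getD "Affinities" []) hpre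
    simp only at hcore
    rw [apply_ite PySem.Dict.items]
    rw [← apply_ite (fun l => ((PySem.Dict.mk demon).insert "Affinities" l).items)]
    rw [hcore]
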